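-- pv_equiv track=rewrite | github.com/shoeisha-books/samplecode_365plus1 | dates/0117/blum_blum_shub_1.py | find_blum_primes
-- ===== SOURCE A (Python) =====
-- def is_prime(num):
--     if num < 2:
--         return False
--     for i in range(2, int(num**0.5) + 1):
--         if num % i == 0:
--             return False
--     return True
--
-- def find_blum_primes(k=10000):
--     p, q = 0, 0
--     # 例示のため10000以下の素数を使っていますが
--     # 実際の暗号ではもっと大きな素数が使われます
--     for num in range(k, 1, -1):
--         if is_prime(num) and (num % 4 == 3):
--             if p == 0:
--                 p = num
--             elif q == 0 and num != p:
--                 q = num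
--                 break
--     return p, q
-- ===== SOURCE B (Python) =====
-- def _is_odd_prime(n):
--     # n is odd and n >= 3:n has no even divisors, so try only odd divisors, bound by i*i <= n
--     i = 3
--     while i * i <= n:
--         if n % i == 0:
--             return False
--         i += 2
--     return True
--
-- def find_blum_primes(k=10000):
--     found = []
--     if k >= 3:
--         num = k - (k - 3) % 4  # largest value <= k that is congruent to 3 mod 4
--         while num >= 3 and len(found) < 2:
--             if _is_odd_prime(num):
--                 found.append(num)
--             num -= 4
--     padded = found + [0, 0]
--     return padded[0], padded[1]
-- ===== Notes on version B (the rewrite author's own statement) =====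
-- stated objective: alternative
-- what changed: B jumps straight to the largest candidate congruent to 3 mod 4 below k and steps down by 4 (instead of testing every integer), collects hits into a list stopping at two, and tests primality by odd-only trial division bounded by i*i<=n instead of A's full scan of 2..sqrt with a float power.
import Mathlib
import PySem

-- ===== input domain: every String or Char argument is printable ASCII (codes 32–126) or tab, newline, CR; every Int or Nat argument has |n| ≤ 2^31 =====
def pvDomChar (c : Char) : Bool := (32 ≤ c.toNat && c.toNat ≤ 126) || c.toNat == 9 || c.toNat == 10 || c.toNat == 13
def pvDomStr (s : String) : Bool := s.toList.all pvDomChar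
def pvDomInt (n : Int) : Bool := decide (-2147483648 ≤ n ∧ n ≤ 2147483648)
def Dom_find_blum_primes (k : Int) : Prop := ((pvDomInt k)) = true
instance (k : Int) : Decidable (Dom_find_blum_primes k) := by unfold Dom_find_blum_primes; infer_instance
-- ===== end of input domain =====

-- B scans only the candidates ≡ 3 (mod 4), descending from the largest one ≤ k, collecting
-- hits into a list, with odd-only trial division bounded by i*i ≤ n (no square root).

-- ===== PORT A =====
-- int(num**0.5) is ported as Nat.sqrt num.toNat: exact for 0 ≤ num ≤ 2^31 (float pow is
-- correctly rounded there and the true square root is never within rounding error of crossing an integer).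
def is_prime (num : Int) : Bool :=
  if num < 2 then false
  else
    (PySem.List.pyRange 2 (((Nat.sqrt num.toNat : Int)) + 1) 1).all
      (fun i => !(PySem.Int.mod num i == 0))

-- for num in range(k, 1, -1): Python's range is lazy and the loop breaks early,
-- so the loop is ported as a recursion on num itself (num = k, k-1, ..., 2)
def fbpA_loop (num p q : Int) : Int × Int :=
  if 1 < num then
    if is_prime num && (PySem.Int.mod num 4 == 3) then
      if p == 0 then fbpA_loop (num - 1) num q
      else if q == 0 && !(num == p) then (p, num)   -- q = num; break
      else fbpA_loop (num - 1) p q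
    else fbpA_loop (num - 1) p q
  else (p, q)
termination_by (num - 1).toNat
decreasing_by all_goals omega

def find_blum_primes (k : Int) : Int × Int :=
  fbpA_loop k 0 0

-- ===== PORT B =====
-- while i * i <= n: …  (n odd, n ≥ 3)
def iopLoop (n i : Int) : Bool :=
  if i * i ≤ n then
    if PySem.Int.mod n i == 0 then false else iopLoop n (i + 2)
  else true
termination_by (n + 1 - i).toNat
decreasing_by
  rename_i h
  have hi : i ≤ n := by nlinarith [mul_self_nonneg i]
  omega

def is_odd_prime (n : Int) : Bool := iopLoop n 3

-- while num >= 3 and len(found) < 2: …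
def fbpB_loop (num : Int) (found : List Int) : List Int :=
  if 3 ≤ num ∧ found.length < 2 then
    if is_odd_prime num then fbpB_loop (num - 4) (found ++ [num])
    else fbpB_loop (num - 4) found
  else found
termination_by num.toNat
decreasing_by all_goals omega

def find_blum_primes_alt (k : Int) : Int × Int :=
  let found := if 3 ≤ k then fbpB_loop (k - PySem.Int.mod (k - 3) 4) [] else []
  let padded := found ++ [0, 0]
  -- padded[0], padded[1]: padded.length ≥ 2, so Python's indexing cannot raise; getD is exact here
  (padded.getD 0 0, padded.getD 1 0)

-- ===== PRECONDITION & SPEC =====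
def Spec_find_blum_primes (k : Int) (out : Int × Int) : Prop := out = find_blum_primes_alt k
instance (k : Int) (out : Int × Int) : Decidable (Spec_find_blum_primes k out) := by unfold Spec_find_blum_primes; infer_instance

-- ===== CLAIM (what is proved, stated in full; the proofs are below) =====
def Claim_equal_find_blum_primes : Prop := ∀ (k : Int), Dom_find_blum_primes k → Spec_find_blum_primes k (find_blum_primes k)

-- ===== LEMMAS AND PROOFS =====

theorem sqrt_bound (n i : Int) (hi : 0 ≤ i) (hn : 0 ≤ n) :
    i ≤ (Nat.sqrt n.toNat : Int) ↔ i * i ≤ n := by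
  obtain ⟨m, rfl⟩ := Int.eq_ofNat_of_zero_le hn
  obtain ⟨a, rfl⟩ := Int.eq_ofNat_of_zero_le hi
  rw [Int.toNat_natCast]
  exact_mod_cast Nat.le_sqrt

theorem is_prime_char (n : Int) (hn : 2 ≤ n) :
    is_prime n = true ↔ ∀ i : Int, 2 ≤ i → i * i ≤ n → PySem.Int.mod n i ≠ 0 := by
  unfold is_prime
  rw [if_neg (by omega)]
  rw [List.all_eq_true]
  constructor
  · intro h i h2 hsq
    have hmem : i ∈ PySem.List.pyRange 2 ((Nat.sqrt n.toNat : Int) + 1) 1 := by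
      rw [PySem.List.mem_pyRange_one]
      have := (sqrt_bound n i (by omega) (by omega)).mpr hsq
      omega
    have := h i hmem
    intro hc
    rw [hc] at this
    simp at this
  · intro h i hmem
    rw [PySem.List.mem_pyRange_one] at hmem
    have hsq : i * i ≤ n := (sqrt_bound n i (by omega) (by omega)).mp (by omega)
    have := h i (by omega) hsq
    simp [this]


theorem iopLoop_char (n : Int) : ∀ i : Int, 1 ≤ i →
    (iopLoop n i = true ↔
      ∀ j : Int, i ≤ j → j * j ≤ n → (j - i) % 2 = 0 → PySem.Int.mod n j ≠ 0) := by
  intro i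
  induction i using iopLoop.induct n with
  | case1 i hle hz =>
    intro _
    rw [iopLoop, if_pos hle, if_pos hz]
    have hnp : ¬ (∀ j : Int, i ≤ j → j * j ≤ n → (j - i) % 2 = 0 → PySem.Int.mod n j ≠ 0) :=
      fun h => (h i le_rfl hle (by omega)) (by simpa using hz)
    simp only [Bool.false_eq_true, false_iff]
    exact hnp
  | case2 i hle hz ih =>
    intro hi
    rw [iopLoop, if_pos hle, if_neg hz]
    rw [ih (by omega)]
    constructor
    · intro h j hj hsq hpar
      by_cases hji : j = i
      · subst hji; simpa using hz
      · exact h j (by omega) hsq (by omega)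
    · intro h j hj hsq hpar
      exact h j (by omega) hsq (by omega)
  | case3 i hle =>
    intro hi
    rw [iopLoop, if_neg hle]
    simp only [true_iff]
    intro j hj hsq _
    exfalso
    have : i * i ≤ j * j := by nlinarith
    omega

theorem primes_agree (n : Int) (h3 : 3 ≤ n) (hm : PySem.Int.mod n 4 = 3) :
    is_prime n = is_odd_prime n := by
  rw [PySem.Int.mod_eq_emod_of_pos (by omega : (0:Int) < 4)] at hm
  have hodd : n % 2 = 1 := by omega
  have hiff : (∀ i : Int, 2 ≤ i → i * i ≤ n → PySem.Int.mod n i ≠ 0) ↔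
      (∀ j : Int, 3 ≤ j → j * j ≤ n → (j - 3) % 2 = 0 → PySem.Int.mod n j ≠ 0) := by
    constructor
    · intro h j hj hsq _; exact h j (by omega) hsq
    · intro h i hi hsq
      by_cases hpar : i % 2 = 0
      · -- an even divisor of an odd n is impossible
        intro hdvd
        rw [PySem.Int.mod_eq_zero_iff_dvd] at hdvd
        have h2i : (2 : Int) ∣ i := by omega
        have h2n : (2 : Int) ∣ n := dvd_trans h2i hdvd
        omega
      · exact h i (by omega) hsq (by omega)
  have hA := is_prime_char n (by omega)
  have hB := iopLoop_char n 3 (by omega)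
  rw [hiff] at hA
  unfold is_odd_prime
  exact Bool.eq_iff_iff.mpr (hA.trans hB.symm)

def qualA (n : Int) : Bool := is_prime n && (PySem.Int.mod n 4 == 3)

theorem is_prime_ge_two (n : Int) (h : is_prime n = true) : 2 ≤ n := by
  by_contra hlt
  unfold is_prime at h
  rw [if_pos (by omega)] at h
  exact Bool.false_ne_true h

-- proof-side restatement of A's loop as a fold over the materialized list of candidates
def fbpA_list : List Int → Int → Int → Int × Int
  | [], p, q => (p, q)
  | num :: rest, p, q =>
    if is_prime num && (PySem.Int.mod num 4 == 3) then
      if p == 0 then fbpA_list rest num q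
      else if q == 0 && !(num == p) then (p, num)
      else fbpA_list rest p q
    else fbpA_list rest p q

theorem fbpA_loop_eq_list : ∀ (m : Nat) (num : Int), (num - 1).toNat = m → ∀ p q : Int,
    fbpA_loop num p q = fbpA_list (PySem.List.pyRange num 1 (-1)) p q := by
  intro m
  induction m using Nat.strong_induction_on with
  | _ m ih =>
    intro num hm p q
    rw [fbpA_loop]
    by_cases h1 : 1 < num
    · rw [if_pos h1, PySem.List.pyRange_neg_one_cons h1, fbpA_list]
      have IH := ih ((num - 1) - 1).toNat (by omega) (num - 1) rfl
      by_cases hc : (is_prime num && (PySem.Int.mod num 4 == 3)) = true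
      · rw [if_pos hc, if_pos hc]
        by_cases hp : (p == 0) = true
        · rw [if_pos hp, if_pos hp, IH]
        · rw [if_neg hp, if_neg hp]
          by_cases hqq : (q == 0 && !(num == p)) = true
          · rw [if_pos hqq, if_pos hqq]
          · rw [if_neg hqq, if_neg hqq, IH]
      · rw [if_neg hc, if_neg hc, IH]
    · rw [if_neg h1, PySem.List.pyRange_neg_one_eq_nil (by omega), fbpA_list]

theorem fbpA_phase2 (L : List Int) (a : Int) (hnm : a ∉ L) (ha : a ≠ 0) :
    fbpA_list L a 0 = (a, (L.filter qualA).headD 0) := by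
  induction L with
  | nil => simp [fbpA_list]
  | cons num rest ih =>
    have hna : num ≠ a := by intro h; exact hnm (h ▸ List.mem_cons_self)
    rw [fbpA_list]
    have hdef : (is_prime num && (PySem.Int.mod num 4 == 3)) = qualA num := rfl
    rw [hdef]
    by_cases hq : qualA num = true
    · rw [if_pos hq]
      rw [if_neg (by simpa using ha)]
      rw [if_pos (by simp [hna])]
      simp [List.filter_cons, hq]
    · rw [if_neg hq]
      rw [ih (fun h => hnm (List.mem_cons_of_mem _ h))]
      simp only [List.filter_cons]
      rw [if_neg hq]

theorem fbpA_phase1 (L : List Int) (hnd : L.Nodup) :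
    fbpA_list L 0 0 = ((L.filter qualA).getD 0 0, (L.filter qualA).getD 1 0) := by
  induction L with
  | nil => simp [fbpA_list]
  | cons num rest ih =>
    have hnd' : rest.Nodup := (List.nodup_cons.mp hnd).2
    have hnm : num ∉ rest := (List.nodup_cons.mp hnd).1
    rw [fbpA_list]
    have hdef : (is_prime num && (PySem.Int.mod num 4 == 3)) = qualA num := rfl
    rw [hdef]
    by_cases hq : qualA num = true
    · rw [if_pos hq]
      have hip : is_prime num = true := by
        have := hq; unfold qualA at this; exact (Bool.and_eq_true_iff.mp this).1
      have hnum2 : 2 ≤ num := is_prime_ge_two num hip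
      rw [if_pos (by simp)]
      rw [fbpA_phase2 rest num hnm (by omega)]
      have hf : List.filter qualA (num :: rest) = num :: rest.filter qualA := by
        simp [List.filter_cons, hq]
      rw [hf]
      cases rest.filter qualA <;> simp
    · rw [if_neg hq]
      rw [ih hnd']
      have hf : List.filter qualA (num :: rest) = rest.filter qualA := by
        simp only [List.filter_cons]
        rw [if_neg hq]
      rw [hf]

def descCands (num : Int) : List Int :=
  if 3 ≤ num then num :: descCands (num - 4) else []
termination_by num.toNat
decreasing_by omega

theorem fbpB_char (num : Int) (found : List Int) : found.length ≤ 2 →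
    fbpB_loop num found =
      (found ++ (descCands num).filter (fun n => is_odd_prime n)).take 2 := by
  induction num, found using fbpB_loop.induct with
  | case1 num found hc hp ih =>
    intro hlen
    rw [fbpB_loop, if_pos hc, if_pos hp]
    have hdc : descCands num = num :: descCands (num - 4) := by
      rw [descCands, if_pos hc.1]
    rw [hdc, ih (by simp; omega)]
    simp [List.filter_cons, hp, List.append_assoc]
  | case2 num found hc hp ih =>
    intro hlen
    rw [fbpB_loop, if_pos hc, if_neg hp]
    have hdc : descCands num = num :: descCands (num - 4) := by
      rw [descCands, if_pos hc.1]
    rw [hdc, ih hlen]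
    simp [List.filter_cons, hp]
  | case3 num found hc =>
    intro hlen
    rw [fbpB_loop, if_neg hc]
    rcases Decidable.not_and_iff_not_or_not.mp hc with h | h
    · rw [descCands, if_neg h]
      simp [List.take_of_length_le hlen]
    · have h2 : found.length = 2 := by omega
      rw [List.take_append, h2]
      simp [List.take_of_length_le h2.le]

theorem descCands_mem (s : Int) : ∀ x ∈ descCands s, 3 ≤ x ∧ x % 4 = s % 4 := by
  induction s using descCands.induct with
  | case1 s h ih =>
    rw [descCands, if_pos h]
    intro x hx
    rcases List.mem_cons.mp hx with rfl | hx'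
    · exact ⟨h, rfl⟩
    · have := ih x hx'
      omega
  | case2 s h =>
    rw [descCands, if_neg h]
    intro x hx
    exact absurd hx (List.not_mem_nil)

theorem range_filter_aux : ∀ (m : Nat) (k : Int), (k - 1).toNat = m →
    (PySem.List.pyRange k 1 (-1)).filter (fun n => PySem.Int.mod n 4 == 3) =
      if 3 ≤ k then descCands (k - PySem.Int.mod (k - 3) 4) else [] := by
  intro m
  induction m using Nat.strong_induction_on with
  | _ m ih =>
    intro k hk
    by_cases hk1 : k ≤ 1
    · rw [PySem.List.pyRange_neg_one_eq_nil hk1]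
      rw [if_neg (by omega)]
      rfl
    · have hk2 : 2 ≤ k := by omega
      have hm3 : PySem.Int.mod (k - 3) 4 = (k - 3) % 4 :=
        PySem.Int.mod_eq_emod_of_pos (by omega)
      have hm4 : PySem.Int.mod (k - 4) 4 = (k - 4) % 4 :=
        PySem.Int.mod_eq_emod_of_pos (by omega)
      have hmk : PySem.Int.mod k 4 = k % 4 :=
        PySem.Int.mod_eq_emod_of_pos (by omega)
      rw [PySem.List.pyRange_neg_one_cons (by omega : (1:Int) < k)]
      rw [List.filter_cons]
      have IH := ih ((k - 1) - 1).toNat (by omega) (k - 1) rfl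
      have hm5 : PySem.Int.mod (k - 1 - 3) 4 = (k - 1 - 3) % 4 :=
        PySem.Int.mod_eq_emod_of_pos (by omega)
      by_cases hmod : k % 4 = 3
      · rw [if_pos (by rw [hmk]; exact beq_iff_eq.mpr hmod)]
        rw [if_pos (by omega : (3:Int) ≤ k)]
        have hs : k - PySem.Int.mod (k - 3) 4 = k := by rw [hm3]; omega
        rw [hs]
        rw [show descCands k = k :: descCands (k - 4) from by
          rw [descCands, if_pos (by omega : (3:Int) ≤ k)]]
        refine congrArg (fun l => k :: l) ?_
        rw [IH]
        by_cases hk3 : k = 3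
        · subst hk3
          rw [if_neg (by omega)]
          rw [show descCands ((3:Int) - 4) = [] from by
            rw [descCands, if_neg (by omega)]]
        · rw [if_pos (by omega : (3:Int) ≤ k - 1), hm5]
          have heq : k - 1 - (k - 1 - 3) % 4 = k - 4 := by omega
          rw [heq]
      · rw [if_neg (by rw [hmk]; simp; omega)]
        rw [IH]
        by_cases hk3 : 3 ≤ k
        · have hk4 : 4 ≤ k := by
            rcases eq_or_lt_of_le hk3 with h | h
            · exfalso; omega
            · omega
          rw [if_pos (by omega : (3:Int) ≤ k - 1), if_pos hk3, hm5, hm3]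
          have heq : k - 1 - (k - 1 - 3) % 4 = k - (k - 3) % 4 := by omega
          rw [heq]
        · rw [if_neg (by omega), if_neg (by omega)]

theorem range_filter_eq_descCands (k : Int) :
    (PySem.List.pyRange k 1 (-1)).filter (fun n => PySem.Int.mod n 4 == 3) =
      if 3 ≤ k then descCands (k - PySem.Int.mod (k - 3) 4) else [] :=
  range_filter_aux (k - 1).toNat k rfl

theorem filter_qual_split (l : List Int) :
    (l.filter (fun n => PySem.Int.mod n 4 == 3)).filter (fun n => is_prime n) =
      l.filter qualA := by
  induction l with
  | nil => rfl
  | cons x t ih =>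
    by_cases hmx : (PySem.Int.mod x 4 == 3) = true
    · by_cases hx : is_prime x = true
      · rw [List.filter_cons, if_pos hmx, List.filter_cons, if_pos hx,
            List.filter_cons, if_pos (show qualA x = true from by unfold qualA; rw [hx, hmx]; decide), ih]
      · rw [List.filter_cons, if_pos hmx, List.filter_cons, if_neg hx,
            List.filter_cons,
            if_neg (show ¬ qualA x = true from by
              unfold qualA
              intro hcc
              exact hx (Bool.and_eq_true_iff.mp hcc).1), ih]
    · rw [List.filter_cons, if_neg hmx, List.filter_cons,
          if_neg (show ¬ qualA x = true from by
            unfold qualA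
            intro hcc
            exact hmx (Bool.and_eq_true_iff.mp hcc).2), ih]

-- ===== VERDICT (by name: the statement is the Claim_ definition above) =====
theorem find_blum_primes_spec : Claim_equal_find_blum_primes := by
  intro k _
  unfold Spec_find_blum_primes find_blum_primes find_blum_primes_alt
  have hnd : (PySem.List.pyRange k 1 (-1)).Nodup := by
    rw [PySem.List.pyRange_neg_one_eq_reverse]
    simp [List.nodup_reverse, PySem.List.nodup_pyRange_one]
  rw [fbpA_loop_eq_list (k - 1).toNat k rfl 0 0]
  rw [fbpA_phase1 _ hnd, ← filter_qual_split, range_filter_eq_descCands]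
  have hGmain : 3 ≤ k →
      (descCands (k - PySem.Int.mod (k - 3) 4)).filter (fun n => is_prime n) =
        (descCands (k - PySem.Int.mod (k - 3) 4)).filter (fun n => is_odd_prime n) := by
    intro h3
    have hs4 : (k - PySem.Int.mod (k - 3) 4) % 4 = 3 := by
      rw [PySem.Int.mod_eq_emod_of_pos (by omega : (0:Int) < 4)]
      omega
    apply List.filter_congr
    intro x hx
    have hmem := descCands_mem _ x hx
    have hx4 : PySem.Int.mod x 4 = 3 := by
      rw [PySem.Int.mod_eq_emod_of_pos (by omega : (0:Int) < 4)]
      omega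
    exact primes_agree x hmem.1 hx4
  by_cases h3 : 3 ≤ k
  · rw [if_pos h3, if_pos h3, hGmain h3]
    rw [fbpB_char _ [] (by simp)]
    simp only [List.nil_append]
    cases hF : (descCands (k - PySem.Int.mod (k - 3) 4)).filter (fun n => is_odd_prime n) with
    | nil => simp
    | cons a u =>
      cases u with
      | nil => simp
      | cons b v => simp
  · rw [if_neg h3, if_neg h3]
    simp
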